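-- pv_equiv track=rewrite | github.com/JALK96/electrofit-ip6-paper-2025 | ion_simulation_plan/plan_sims.py | _ensure_neutral_counts
-- ===== SOURCE A (Python) =====
-- import math
--
-- def _ensure_neutral_counts(
--     positive_count: int,
--     cation_charge: int,
--     anion_charge: int,
--     solute_charge: int,
-- ) -> tuple[int, int]:
--     if cation_charge <= 0:
--         raise ValueError("Cation charge must be positive.")
--     if anion_charge >= 0:
--         raise ValueError("Anion charge must be negative.")
--
--     min_positive = math.ceil(-solute_charge / cation_charge) if cation_charge > 0 else 0
--     if positive_count < min_positive:
--         positive_count = min_positive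
--
--     modulus = abs(anion_charge)
--     neutrality_term = positive_count * cation_charge + solute_charge
--     remainder = neutrality_term % modulus
--     if remainder != 0:
--         for delta in range(1, modulus + 1):
--             test_term = (positive_count + delta) * cation_charge + solute_charge
--             if test_term % modulus == 0:
--                 positive_count += delta
--                 neutrality_term = test_term
--                 break
--         else:  # pragma: no cover - defensive; should not happen for monovalent anions
--             raise ValueError("Unable to satisfy neutrality with integer ion counts.")
--
--     total_positive_charge = positive_count * cation_charge
--     if total_positive_charge + solute_charge < 0:
--         raise ValueError("Insufficient positive ions to neutralize the solute charge.")
--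
--     negative_count = (total_positive_charge + solute_charge) // abs(anion_charge)
--     return positive_count, negative_count
-- ===== SOURCE B (Python) =====
-- import math
--
-- def _ensure_neutral_counts(
--     positive_count: int,
--     cation_charge: int,
--     anion_charge: int,
--     solute_charge: int,
-- ) -> tuple[int, int]:
--     if cation_charge <= 0:
--         raise ValueError("Cation charge must be positive.")
--     if anion_charge >= 0:
--         raise ValueError("Anion charge must be negative.")
--
--     # clamp to the least count whose positive charge covers the solute charge
--     positive_count = max(positive_count, -(solute_charge // cation_charge))
--
--     modulus = -anion_charge
--     remainder = (positive_count * cation_charge + solute_charge) % modulus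
--     if remainder:
--         # smallest delta >= 1 with delta*cation_charge ≡ -remainder (mod modulus),
--         # solved in closed form via the extended gcd
--         g = math.gcd(cation_charge, modulus)
--         if remainder % g:
--             raise ValueError("Unable to satisfy neutrality with integer ion counts.")
--         m1 = modulus // g
--         delta = (-(remainder // g) * pow(cation_charge // g, -1, m1)) % m1
--         positive_count += delta
--
--     negative_count = (positive_count * cation_charge + solute_charge) // modulus
--     return positive_count, negative_count
-- ===== Notes on version B (the rewrite author's own statement) =====
-- stated objective: faster
-- what changed: B replaces A's linear search over delta in range(1, modulus+1) by a closed-form solution of the linear congruence delta*cation_charge == -remainder (mod modulus) via math.gcd and the modular inverse pow(..., -1, ...), and folds A's clamp and unreachable final check into direct expressions.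
import Mathlib
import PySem

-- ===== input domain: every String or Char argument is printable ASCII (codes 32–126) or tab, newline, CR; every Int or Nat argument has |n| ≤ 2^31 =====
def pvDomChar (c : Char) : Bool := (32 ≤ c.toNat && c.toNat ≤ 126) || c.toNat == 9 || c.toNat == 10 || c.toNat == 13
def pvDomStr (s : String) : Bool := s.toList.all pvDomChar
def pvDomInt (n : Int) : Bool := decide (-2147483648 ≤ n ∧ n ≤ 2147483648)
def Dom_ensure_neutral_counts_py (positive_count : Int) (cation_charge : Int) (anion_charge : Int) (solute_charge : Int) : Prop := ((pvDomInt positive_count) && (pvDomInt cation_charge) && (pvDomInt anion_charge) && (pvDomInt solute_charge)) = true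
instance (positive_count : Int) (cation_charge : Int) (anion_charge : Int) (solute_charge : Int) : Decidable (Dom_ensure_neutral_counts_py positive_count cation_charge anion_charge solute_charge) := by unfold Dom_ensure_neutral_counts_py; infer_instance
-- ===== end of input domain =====

-- B replaces A's O(modulus) delta-search loop by a closed-form solution of the linear
-- congruence via the extended gcd; equivalence of return values is proved on Pre_.

-- ===== PORT A =====
-- port of _ensure_neutral_counts (Source A).  'raise ValueError' branches return (0, 0); all of
-- them lie outside Pre_ensure_neutral_counts_py.  math.ceil(-s / c) uses float division in
-- Python; on Dom (|ints| ≤ 2^31) the float error is < 1/c, so it equals the exact ceiling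
-- -(s // c), which is how it is ported.
def ensure_neutral_counts_py (positive_count : Int) (cation_charge : Int) (anion_charge : Int) (solute_charge : Int) : Int × Int :=
  if cation_charge ≤ 0 then (0, 0)
  else if anion_charge ≥ 0 then (0, 0)
  else
    let min_positive : Int :=
      if cation_charge > 0 then -(PySem.Int.floordiv solute_charge cation_charge) else 0
    let pc : Int := if positive_count < min_positive then min_positive else positive_count
    let modulus : Int := |anion_charge|
    let neutrality_term : Int := pc * cation_charge + solute_charge
    let remainder : Int := PySem.Int.mod neutrality_term modulus
    -- the for/else loop: first delta in range(1, modulus+1) passing the test, else raise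
    let pc2? : Option Int :=
      if remainder ≠ 0 then
        ((PySem.List.pyRange 1 (modulus + 1) 1).find?
          (fun delta => PySem.Int.mod ((pc + delta) * cation_charge + solute_charge) modulus == 0)).map
          (fun delta => pc + delta)
      else some pc
    match pc2? with
    | none => (0, 0)
    | some pc2 =>
      let total_positive_charge : Int := pc2 * cation_charge
      if total_positive_charge + solute_charge < 0 then (0, 0)
      else (pc2, PySem.Int.floordiv (total_positive_charge + solute_charge) |anion_charge|)

-- ===== PORT B =====
-- port of Source B.  Python's pow(x, -1, m1) returns the inverse of x modulo m1 in [0, m1);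
-- it is ported as the Bezout coefficient Int.gcdA x m1 — another representative of the same
-- residue class — which gives the identical delta after the immediately following '% m1'.
def ensure_neutral_counts_py_alt (positive_count : Int) (cation_charge : Int) (anion_charge : Int) (solute_charge : Int) : Int × Int :=
  if cation_charge ≤ 0 then (0, 0)
  else if anion_charge ≥ 0 then (0, 0)
  else
    let pc : Int := max positive_count (-(PySem.Int.floordiv solute_charge cation_charge))
    let modulus : Int := -anion_charge
    let remainder : Int := PySem.Int.mod (pc * cation_charge + solute_charge) modulus
    if remainder ≠ 0 then
      let g : Int := Int.gcd cation_charge modulus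
      if PySem.Int.mod remainder g ≠ 0 then (0, 0)
      else
        let m1 : Int := PySem.Int.floordiv modulus g
        let inv : Int := Int.gcdA (PySem.Int.floordiv cation_charge g) m1
        let delta : Int := PySem.Int.mod (-(PySem.Int.floordiv remainder g) * inv) m1
        let pc2 : Int := pc + delta
        (pc2, PySem.Int.floordiv (pc2 * cation_charge + solute_charge) modulus)
    else (pc, PySem.Int.floordiv (pc * cation_charge + solute_charge) modulus)

-- ===== PRECONDITION & SPEC =====
-- Pre_ is exactly where A returns: cation charge positive, anion charge negative (else A
-- raises immediately), and gcd(cation_charge, anion_charge) dividing solute_charge (else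
-- A's delta loop finds no residue and raises "Unable to satisfy neutrality").
def Pre_ensure_neutral_counts_py (positive_count : Int) (cation_charge : Int) (anion_charge : Int) (solute_charge : Int) : Prop :=
  0 < cation_charge ∧ anion_charge < 0 ∧ (Int.gcd cation_charge anion_charge : Int) ∣ solute_charge
instance (positive_count : Int) (cation_charge : Int) (anion_charge : Int) (solute_charge : Int) : Decidable (Pre_ensure_neutral_counts_py positive_count cation_charge anion_charge solute_charge) := by unfold Pre_ensure_neutral_counts_py; infer_instance
def pvWitness_ensure_neutral_counts_py : Int × Int × Int × Int := (3, 2, -3, 1)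
def Spec_ensure_neutral_counts_py (positive_count : Int) (cation_charge : Int) (anion_charge : Int) (solute_charge : Int) (out : Int × Int) : Prop := out = ensure_neutral_counts_py_alt positive_count cation_charge anion_charge solute_charge
instance (positive_count : Int) (cation_charge : Int) (anion_charge : Int) (solute_charge : Int) (out : Int × Int) : Decidable (Spec_ensure_neutral_counts_py positive_count cation_charge anion_charge solute_charge out) := by unfold Spec_ensure_neutral_counts_py; infer_instance

-- ===== CLAIM (what is proved, stated in full; the proofs are below) =====
def Claim_equal_ensure_neutral_counts_py : Prop := ∀ (positive_count : Int) (cation_charge : Int) (anion_charge : Int) (solute_charge : Int), Dom_ensure_neutral_counts_py positive_count cation_charge anion_charge solute_charge → Pre_ensure_neutral_counts_py positive_count cation_charge anion_charge solute_charge → Spec_ensure_neutral_counts_py positive_count cation_charge anion_charge solute_charge (ensure_neutral_counts_py positive_count cation_charge anion_charge solute_charge)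

-- ===== LEMMAS AND PROOFS =====

-- helper: the closed-form delta B computes (used only by the proofs below)
def pvDelta (c m r : Int) : Int :=
  -(r / Int.gcd c m) * Int.gcdA (c / Int.gcd c m) (m / Int.gcd c m) % (m / Int.gcd c m)

lemma pv_div_pos (g m : Int) (hg : 0 < g) (hm : 0 < m) (h : g ∣ m) : 0 < m / g := by
  obtain ⟨m', rfl⟩ := h
  rw [Int.mul_ediv_cancel_left _ (by omega)]
  nlinarith

lemma pv_clamp_nonneg (pc c s : Int) (hc : 0 < c) (hpc : -(s / c) ≤ pc) : 0 ≤ pc * c + s := by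
  have h1 : c * (s / c) + s % c = s := Int.mul_ediv_add_emod s c
  have h2 : 0 ≤ s % c := Int.emod_nonneg s (by omega)
  have h3 : (-(s / c)) * c ≤ pc * c := mul_le_mul_of_nonneg_right hpc hc.le
  have h4 : (-(s / c)) * c = -(c * (s / c)) := by ring
  linarith

lemma pv_delta_spec (c m r : Int) (hc : 0 < c) (hm : 0 < m)
    (hr0 : 0 ≤ r) (hrm : r < m) (hrne : r ≠ 0) (hgr : (Int.gcd c m : Int) ∣ r) :
    1 ≤ pvDelta c m r ∧ pvDelta c m r ≤ m ∧ (m ∣ pvDelta c m r * c + r) ∧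
      ∀ k, 1 ≤ k → k < pvDelta c m r → ¬ (m ∣ k * c + r) := by
  set g : Int := (Int.gcd c m : Int) with hgdef
  have hgnat : 0 < Int.gcd c m := Int.gcd_pos_of_ne_zero_left m (by omega)
  have hgpos : 0 < g := by rw [hgdef]; exact_mod_cast hgnat
  have hgc : g ∣ c := hgdef ▸ Int.gcd_dvd_left c m
  have hgm : g ∣ m := hgdef ▸ Int.gcd_dvd_right c m
  obtain ⟨c', hc'⟩ := hgc
  obtain ⟨m', hm'⟩ := hgm
  obtain ⟨r', hr'⟩ := hgr
  have hgne : g ≠ 0 := by omega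
  have hcg : c / g = c' := by rw [hc', Int.mul_ediv_cancel_left _ hgne]
  have hmg : m / g = m' := by rw [hm', Int.mul_ediv_cancel_left _ hgne]
  have hrg : r / g = r' := by rw [hr', Int.mul_ediv_cancel_left _ hgne]
  have hm'pos : 0 < m' := by nlinarith
  have hc'pos : 0 < c' := by nlinarith
  have hcop : Int.gcd c' m' = 1 := by
    have h := Int.gcd_div_gcd_div_gcd hgnat
    rwa [← hgdef, hcg, hmg] at h
  have hbez : (1 : Int) = c' * Int.gcdA c' m' + m' * Int.gcdB c' m' := by
    have h := Int.gcd_eq_gcd_ab c' m'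
    rwa [hcop] at h
  set A := Int.gcdA c' m' with hA
  set x : Int := -r' * A with hx
  have hδdef : pvDelta c m r = x % m' := by
    rw [pvDelta, ← hgdef, hcg, hmg, hrg, hx]
  have hδ0 : 0 ≤ pvDelta c m r := by rw [hδdef]; exact Int.emod_nonneg x (by omega)
  have hδlt : pvDelta c m r < m' := by rw [hδdef]; exact Int.emod_lt_of_pos x hm'pos
  have hxmod : m' ∣ pvDelta c m r - x := by
    rw [hδdef, Int.emod_def]; exact ⟨-(x / m'), by ring⟩
  obtain ⟨t, ht⟩ := hxmod
  -- main congruence: m' ∣ pvDelta * c' + r'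
  have hsol' : m' ∣ pvDelta c m r * c' + r' := by
    refine ⟨t * c' + r' * Int.gcdB c' m', ?_⟩
    have hd : pvDelta c m r = x + m' * t := by linarith
    rw [hd, hx]
    nlinarith [hbez]
  have hsol : m ∣ pvDelta c m r * c + r := by
    have heq : pvDelta c m r * c + r = g * (pvDelta c m r * c' + r') := by
      rw [hc', hr']; ring
    rw [heq]
    have h2 := mul_dvd_mul_left g hsol'
    rwa [← hm'] at h2
  have hm'le : m' ≤ m := by nlinarith
  -- pvDelta ≠ 0
  have hδne : pvDelta c m r ≠ 0 := by
    intro h0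
    rw [h0] at hsol'
    simp at hsol'
    have : m ∣ r := by
      rw [hm', hr']; exact mul_dvd_mul_left g hsol'

    have := Int.le_of_dvd (by omega) this
    omega
  refine ⟨by omega, by omega, hsol, ?_⟩
  intro k hk1 hk2 hkdvd
  -- m' ∣ k*c' + r'
  have hk' : m' ∣ k * c' + r' := by
    have heq : k * c + r = g * (k * c' + r') := by rw [hc', hr']; ring
    have h := hkdvd
    rw [heq, hm'] at h
    exact (mul_dvd_mul_iff_left hgne).mp h
  have hdiff : m' ∣ (k - pvDelta c m r) * c' := by
    have : (k - pvDelta c m r) * c' = (k * c' + r') - (pvDelta c m r * c' + r') := by ring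
    rw [this]
    exact dvd_sub hk' hsol'
  have hcop2 : IsCoprime (m' : Int) c' := by
    rw [Int.isCoprime_iff_gcd_eq_one, Int.gcd_comm]
    exact hcop
  have : m' ∣ k - pvDelta c m r := hcop2.dvd_of_dvd_mul_right hdiff
  have := Int.eq_zero_of_abs_lt_dvd this (by rw [abs_of_neg (by omega)]; omega)
  omega

theorem main_equiv (p c a s : Int) (hc : 0 < c) (ha : a < 0)
    (hgs : (Int.gcd c a : Int) ∣ s) :
    ensure_neutral_counts_py p c a s = ensure_neutral_counts_py_alt p c a s := by
  have hm : 0 < -a := by omega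
  unfold ensure_neutral_counts_py ensure_neutral_counts_py_alt
  rw [if_neg (by omega : ¬ c ≤ 0), if_neg (by omega : ¬ a ≥ 0),
      if_neg (by omega : ¬ c ≤ 0), if_neg (by omega : ¬ a ≥ 0), if_pos (by omega : c > 0)]
  simp only [PySem.Int.floordiv_eq_ediv_of_pos hc, abs_of_neg ha,
    PySem.Int.mod_eq_emod_of_pos hm]
  have hpc : (if p < -(s / c) then -(s / c) else p) = max p (-(s / c)) := by
    split_ifs with h <;> omega
  rw [hpc]
  set m : Int := -a with hmdef
  set pc : Int := max p (-(s / c)) with hpcdef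
  have hpcge : -(s / c) ≤ pc := le_max_right p _
  set r : Int := (pc * c + s) % m with hrdef
  have hr0 : 0 ≤ r := Int.emod_nonneg _ (by omega)
  have hrm : r < m := Int.emod_lt_of_pos _ hm
  have hnn : 0 ≤ pc * c + s := pv_clamp_nonneg pc c s hc hpcge
  by_cases hr : r = 0
  · simp [hr, not_lt.mpr hnn, PySem.Int.floordiv_eq_ediv_of_pos hm]
  · -- remainder ≠ 0 branch
    have hgcd : Int.gcd c m = Int.gcd c a := by rw [hmdef]; simp [Int.gcd]
    have hgnat : 0 < Int.gcd c m := Int.gcd_pos_of_ne_zero_left m (by omega)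
    have hgpos : (0 : Int) < (Int.gcd c m : Int) := by exact_mod_cast hgnat
    have hgdvdm : ((Int.gcd c m : Int)) ∣ m := Int.gcd_dvd_right c m
    have hgdvdc : ((Int.gcd c m : Int)) ∣ c := Int.gcd_dvd_left c m
    have hgdvds : ((Int.gcd c m : Int)) ∣ s := by rw [hgcd]; exact hgs
    have hsubr : pc * c + s - r = m * ((pc * c + s) / m) := by
      rw [hrdef, Int.emod_def]; ring
    have hgdvdr : ((Int.gcd c m : Int)) ∣ r := by
      have h1 : ((Int.gcd c m : Int)) ∣ pc * c + s - r :=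
        hsubr ▸ Dvd.dvd.mul_right hgdvdm _
      have h2 : ((Int.gcd c m : Int)) ∣ pc * c + s := by
        exact dvd_add (Dvd.dvd.mul_left hgdvdc pc) hgdvds
      have := dvd_sub h2 h1
      simpa using this
    have hmodrg : PySem.Int.mod r (Int.gcd c m) = 0 :=
      (PySem.Int.mod_eq_zero_iff_dvd _ _).mpr hgdvdr
    have hm1pos : 0 < m / (Int.gcd c m : Int) := pv_div_pos _ _ hgpos hm hgdvdm
    obtain ⟨h1, h2, h3, h4⟩ := pv_delta_spec c m r hc hm hr0 hrm hr hgdvdr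
    -- the find? in A returns exactly pvDelta c m r
    have hPk : ∀ k : Int, (((pc + k) * c + s) % m == 0) = true ↔ m ∣ k * c + r := by
      intro k
      rw [beq_iff_eq, PySem.Int.emod_eq_zero_iff_dvd]
      have h5 : m ∣ pc * c + s - r := hsubr ▸ Dvd.intro _ rfl
      constructor
      · intro h
        have heq : k * c + r = ((pc + k) * c + s) - (pc * c + s - r) := by ring
        rw [heq]; exact dvd_sub h h5
      · intro h
        have heq : (pc + k) * c + s = (k * c + r) + (pc * c + s - r) := by ring
        rw [heq]; exact dvd_add h h5
    have hfind : (PySem.List.pyRange 1 (m + 1) 1).find?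
        (fun delta => ((pc + delta) * c + s) % m == 0) = some (pvDelta c m r) := by
      rw [PySem.List.pyRange_one_append 1 (pvDelta c m r) (m + 1) (by omega) (by omega),
          List.find?_append, PySem.List.pyRange_one_cons (by omega : pvDelta c m r < m + 1)]
      have hnone : (PySem.List.pyRange 1 (pvDelta c m r) 1).find?
          (fun delta => ((pc + delta) * c + s) % m == 0) = none := by
        rw [List.find?_eq_none]
        intro x hx hPx
        rw [PySem.List.mem_pyRange_one] at hx
        exact h4 x hx.1 hx.2 ((hPk x).mp hPx)
      rw [hnone]
      simp [List.find?, (hPk (pvDelta c m r)).mpr h3]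
    have hnn2 : ¬ ((pc + pvDelta c m r) * c + s < 0) := by
      rw [not_lt]
      have hdc : 0 ≤ pvDelta c m r * c := mul_nonneg (by omega) hc.le
      have heq : (pc + pvDelta c m r) * c + s = (pc * c + s) + pvDelta c m r * c := by ring
      linarith
    rw [if_pos hr, if_pos hr, hfind, hmodrg,
        if_neg (by simp : ¬ ((0:Int) ≠ 0))]
    simp only [Option.map_some, PySem.Int.floordiv_eq_ediv_of_pos hgpos,
      PySem.Int.mod_eq_emod_of_pos hm1pos, PySem.Int.floordiv_eq_ediv_of_pos hm]
    unfold pvDelta at hnn2 ⊢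
    simp only [if_neg hnn2]

-- ===== VERDICT (by name: the statement is the Claim_ definition above) =====
theorem ensure_neutral_counts_py_spec : Claim_equal_ensure_neutral_counts_py := by
  intro p c a s _hdom hpre
  unfold Spec_ensure_neutral_counts_py
  exact main_equiv p c a s hpre.1 hpre.2.1 hpre.2.2
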